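-- pv_equiv track=rewrite | github.com/diegorodriguezv/aoc | 2022/08.py | from_bottom
-- ===== SOURCE A (Python) =====
-- def create_vis_map(rows, cols):
--     _map = []
--     for _ in range(rows):
--         _map.append([True] * cols)
--     return _map
--
-- def from_bottom(_map):
--     rows = len(_map)
--     cols = len(_map[0])
--     _max = [_map[rows - 1][col] for col in range(cols)]
--     vis = create_vis_map(rows, cols)
--     for row in range(rows - 2, 0, -1):
--         for col in range(cols - 2, 0, -1):
--             el = _map[row][col]
--             if el <= _max[col]:
--                 vis[row][col] = False
--             if el > _max[col]:
--                 _max[col] = el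
--     return vis
-- ===== SOURCE B (Python) =====
-- def from_bottom(_map):
--     rows = len(_map)
--     cols = len(_map[0])
--     return [[not (1 <= r <= rows - 2 and 1 <= c <= cols - 2
--                   and _map[r][c] <= max(_map[k][c] for k in range(r + 1, rows)))
--              for c in range(cols)]
--             for r in range(rows)]
-- ===== Notes on version B (the rewrite author's own statement) =====
-- stated objective: simpler
-- what changed: B drops A's stateful scan with a mutated per-column running-maximum array and all-True grid: it defines each cell directly by one comprehension, comparing an interior element against max() of its column strictly below, recomputed per cell with no carried state or mutation.
import Mathlib
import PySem

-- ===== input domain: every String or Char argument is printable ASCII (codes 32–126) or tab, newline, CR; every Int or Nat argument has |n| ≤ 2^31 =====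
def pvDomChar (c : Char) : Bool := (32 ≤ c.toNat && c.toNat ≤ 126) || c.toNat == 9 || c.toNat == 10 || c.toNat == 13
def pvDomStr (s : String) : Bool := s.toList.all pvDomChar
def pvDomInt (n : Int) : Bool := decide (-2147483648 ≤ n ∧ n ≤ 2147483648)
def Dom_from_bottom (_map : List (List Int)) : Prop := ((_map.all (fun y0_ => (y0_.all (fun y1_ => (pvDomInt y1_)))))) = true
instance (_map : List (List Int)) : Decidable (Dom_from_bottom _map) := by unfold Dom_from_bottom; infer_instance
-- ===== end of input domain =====

-- B replaces A's stateful scan (mutated all-True grid + per-column running-max array) by a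
-- direct per-cell definition comparing each interior element with max() of its column below
-- (objective: simpler).


-- ===== PORT A =====
def create_vis_map (rows cols : Int) : List (List Bool) :=
  (PySem.List.pyRange 0 rows).foldl (fun m _ => m ++ [PySem.List.pyRepeat [true] cols]) []

def from_bottom (_map : List (List Int)) : List (List Bool) :=
  let rows : Int := (_map.length : Int)
  let cols : Int := ((PySem.List.pyGetD _map 0 []).length : Int)
  let mx0 : List Int := (PySem.List.pyRange 0 cols).map
    (fun col => PySem.List.pyGetD (PySem.List.pyGetD _map (rows - 1) []) col 0)
  let vis0 := create_vis_map rows cols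
  let st := (PySem.List.pyRange (rows - 2) 0 (-1)).foldl (fun st row =>
    (PySem.List.pyRange (cols - 2) 0 (-1)).foldl (fun (st : List (List Bool) × List Int) col =>
      let el := PySem.List.pyGetD (PySem.List.pyGetD _map row []) col 0
      let vis := if el ≤ PySem.List.pyGetD st.2 col 0 then
          PySem.List.pySetD st.1 row (PySem.List.pySetD (PySem.List.pyGetD st.1 row []) col false)
        else st.1
      let mx := if el > PySem.List.pyGetD st.2 col 0 then PySem.List.pySetD st.2 col el else st.2
      (vis, mx)) st) (vis0, mx0)
  st.1

-- ===== PORT B =====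
-- Python's max(iterable): first element, then keep the larger (strictly-greater replaces).
-- The [] case returns 0; it is unreachable in from_bottom_alt (Python raises ValueError there,
-- but the guard 1 ≤ r ≤ rows - 2 short-circuits before max is ever taken of an empty range).
def pymax (l : List Int) : Int :=
  match l with
  | [] => 0
  | x :: xs => xs.foldl (fun m y => if y > m then y else m) x

def from_bottom_alt (_map : List (List Int)) : List (List Bool) :=
  let rows : Int := (_map.length : Int)
  let cols : Int := ((PySem.List.pyGetD _map 0 []).length : Int)
  (PySem.List.pyRange 0 rows).map (fun r =>
    (PySem.List.pyRange 0 cols).map (fun c =>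
      !(decide (1 ≤ r ∧ r ≤ rows - 2) && decide (1 ≤ c ∧ c ≤ cols - 2) &&
        decide (PySem.List.pyGetD (PySem.List.pyGetD _map r []) c 0 ≤
          pymax ((PySem.List.pyRange (r + 1) rows).map
            (fun k => PySem.List.pyGetD (PySem.List.pyGetD _map k []) c 0))))))

-- ===== PRECONDITION & SPEC =====
-- Pre_ = exactly the inputs on which the Python A returns: A raises IndexError on the
-- empty list, when the last row is shorter than the first row, or — when both dimensions
-- have an interior (cols ≥ 3, some row strictly between first and last) — when such an
-- interior row is shorter than cols - 1.
def Pre_from_bottom (_map : List (List Int)) : Prop :=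
  _map ≠ [] ∧
  (_map.headD []).length ≤ (_map.getD (_map.length - 1) []).length ∧
  (∀ i, i < _map.length → 1 ≤ i → i + 2 ≤ _map.length → 3 ≤ (_map.headD []).length →
      (_map.headD []).length - 1 ≤ (_map.getD i []).length)
instance (_map : List (List Int)) : Decidable (Pre_from_bottom _map) := by
  unfold Pre_from_bottom; infer_instance

def pvWitness_from_bottom : List (List Int) :=
  [[3, 0, 3, 7, 3], [2, 5, 5, 1, 2], [6, 5, 3, 3, 2], [3, 3, 5, 4, 9], [3, 5, 3, 9, 0]]

def Spec_from_bottom (_map : List (List Int)) (out : List (List Bool)) : Prop := out = from_bottom_alt _map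
instance (_map : List (List Int)) (out : List (List Bool)) : Decidable (Spec_from_bottom _map out) := by unfold Spec_from_bottom; infer_instance

-- ===== CLAIM (what is proved, stated in full; the proofs are below) =====
def Claim_equal_from_bottom : Prop := ∀ (_map : List (List Int)), Dom_from_bottom _map → Pre_from_bottom _map → Spec_from_bottom _map (from_bottom _map)

-- ===== LEMMAS AND PROOFS =====

def gEl (_map : List (List Int)) (r c : Int) : Int :=
  PySem.List.pyGetD (PySem.List.pyGetD _map r []) c 0

def mA (_map : List (List Int)) (c r : Int) : Int :=
  (PySem.List.pyRange ((_map.length : Int) - 2) r (-1)).foldl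
    (fun m row => if gEl _map row c > m then gEl _map row c else m)
    (gEl _map ((_map.length : Int) - 1) c)

def tgt (_map : List (List Int)) (i j : Int) : Bool :=
  if 1 ≤ i ∧ i ≤ (_map.length : Int) - 2 ∧
     1 ≤ j ∧ j ≤ ((PySem.List.pyGetD _map 0 []).length : Int) - 2 ∧
     gEl _map i j ≤ mA _map j i then false else true

def grid (_map : List (List Int)) (p : Nat → Nat → Bool) : List (List Bool) :=
  (List.range _map.length).map (fun (i : Nat) =>
    (List.range (PySem.List.pyGetD _map 0 []).length).map (fun (j : Nat) =>
      if p i j then tgt _map (i : Int) (j : Int) else true))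

def pA (a b : Int) (i j : Nat) : Bool := decide (a < (i : Int) ∨ ((i : Int) = a ∧ b < (j : Int)))

def mxAt (_map : List (List Int)) (a b : Int) : List Int :=
  (List.range (PySem.List.pyGetD _map 0 []).length).map (fun (j : Nat) =>
    if 1 ≤ (j : Int) ∧ (j : Int) ≤ ((PySem.List.pyGetD _map 0 []).length : Int) - 2 then
      (if b < (j : Int) then mA _map (j : Int) (a - 1) else mA _map (j : Int) a)
    else gEl _map ((_map.length : Int) - 1) (j : Int))

lemma pyRange_neg_one_snoc (a b : Int) (h : b ≤ a) :
    PySem.List.pyRange a (b - 1) (-1) = PySem.List.pyRange a b (-1) ++ [b] := by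
  rw [PySem.List.pyRange_neg_one_eq_reverse, PySem.List.pyRange_neg_one_eq_reverse]
  rw [show b - 1 + 1 = b by ring]
  rw [PySem.List.pyRange_one_cons (by omega)]
  simp

lemma mA_nil (_map : List (List Int)) (c r : Int) (h : (_map.length : Int) - 2 ≤ r) :
    mA _map c r = gEl _map ((_map.length : Int) - 1) c := by
  simp [mA, PySem.List.pyRange_neg_one_eq_nil h]

lemma mA_step (_map : List (List Int)) (c r : Int) (h : r ≤ (_map.length : Int) - 2) :
    mA _map c (r - 1) = if gEl _map r c > mA _map c r then gEl _map r c else mA _map c r := by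
  unfold mA
  rw [pyRange_neg_one_snoc _ _ h, List.foldl_append]
  simp

lemma tgt_border (_map : List (List Int)) (i j : Int)
    (h : i < 1 ∨ (_map.length : Int) - 2 < i ∨ j < 1 ∨ ((PySem.List.pyGetD _map 0 []).length : Int) - 2 < j) :
    tgt _map i j = true := by
  unfold tgt
  rw [if_neg]
  rintro ⟨h1, h2, h3, h4, -⟩
  omega

lemma grid_congr (_map : List (List Int)) (p q : Nat → Nat → Bool)
    (h : ∀ i j, i < _map.length → j < (PySem.List.pyGetD _map 0 []).length →
      p i j = q i j ∨ tgt _map (i : Int) (j : Int) = true) :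
    grid _map p = grid _map q := by
  unfold grid
  refine List.map_congr_left ?_
  intro i hi
  rw [List.mem_range] at hi
  refine List.map_congr_left ?_
  intro j hj
  rw [List.mem_range] at hj
  rcases h i j hi hj with h' | h'
  · rw [h']
  · rw [h']; split <;> split <;> rfl

lemma grid_set (_map : List (List Int)) (p q : Nat → Nat → Bool) (a b : Nat)
    (ha : a < _map.length) (_hb : b < (PySem.List.pyGetD _map 0 []).length)
    (ht : tgt _map (a : Int) (b : Int) = false)
    (hq : ∀ i j, i < _map.length → j < (PySem.List.pyGetD _map 0 []).length →
      q i j = (p i j || (decide (i = a) && decide (j = b)))) :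
    (grid _map p).set a (((grid _map p).getD a []).set b false) = grid _map q := by
  have hga : ((grid _map p).getD a []) = (List.range (PySem.List.pyGetD _map 0 []).length).map (fun j =>
      if p a j then tgt _map (a : Int) (j : Int) else true) := by
    rw [List.getD_eq_getElem?_getD]
    simp [grid, ha]
  rw [hga]
  apply List.ext_getElem
  · simp [grid]
  · intro i h1 h2
    simp only [grid, List.getElem_set, List.getElem_map, List.getElem_range] at h1 ⊢
    by_cases hia : a = i
    · subst hia
      rw [if_pos rfl]
      apply List.ext_getElem
      · simp
      · intro j h3 h4
        simp only [List.getElem_set, List.getElem_map, List.getElem_range] at h3 ⊢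
        rw [hq a j ha (by simpa using h4)]
        by_cases hjb : b = j
        · subst hjb
          simp only [decide_true, Bool.and_true, Bool.or_true, if_true, ht]
        · simp [hjb, Ne.symm hjb]
    · rw [if_neg hia]
      apply List.map_congr_left
      intro j hj
      rw [List.mem_range] at hj
      rw [hq i j (by simpa [grid] using h1) hj]
      simp [Ne.symm hia]

lemma mxAt_length (_map : List (List Int)) (a b : Int) :
    (mxAt _map a b).length = (PySem.List.pyGetD _map 0 []).length := by
  simp [mxAt]

lemma mxAt_getElem (_map : List (List Int)) (a b : Int) (j : Nat)
    (hj : j < (mxAt _map a b).length) :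
    (mxAt _map a b)[j] =
      if 1 ≤ (j : Int) ∧ (j : Int) ≤ ((PySem.List.pyGetD _map 0 []).length : Int) - 2 then
        (if b < (j : Int) then mA _map (j : Int) (a - 1) else mA _map (j : Int) a)
      else gEl _map ((_map.length : Int) - 1) (j : Int) := by
  simp only [mxAt, List.getElem_map, List.getElem_range]

lemma mxAt_read (_map : List (List Int)) (a : Int) (b : Nat)
    (h1 : 1 ≤ (b : Int)) (h2 : (b : Int) ≤ ((PySem.List.pyGetD _map 0 []).length : Int) - 2) :
    PySem.List.pyGetD (mxAt _map a b) (b : Int) 0 = mA _map (b : Int) a := by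
  have hb : b < (mxAt _map a b).length := by rw [mxAt_length]; omega
  rw [PySem.List.pyGetD_natCast, List.getD_eq_getElem?_getD, List.getElem?_eq_getElem hb]
  rw [mxAt_getElem _ _ _ _ hb]
  rw [if_pos ⟨h1, h2⟩, if_neg (lt_irrefl _)]
  rfl

lemma mxAt_congr (_map : List (List Int)) (a b a' b' : Int)
    (h : ∀ j : Int, 1 ≤ j → j ≤ ((PySem.List.pyGetD _map 0 []).length : Int) - 2 →
      (if b < j then mA _map j (a - 1) else mA _map j a) =
      (if b' < j then mA _map j (a' - 1) else mA _map j a')) :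
    mxAt _map a b = mxAt _map a' b' := by
  unfold mxAt
  apply List.map_congr_left
  intro j _
  split
  · next hcond => exact h _ hcond.1 hcond.2
  · rfl

lemma mxAt_set (_map : List (List Int)) (a : Int) (b : Nat)
    (h1 : 1 ≤ (b : Int)) (h2 : (b : Int) ≤ ((PySem.List.pyGetD _map 0 []).length : Int) - 2) :
    (mxAt _map a b).set b (mA _map (b : Int) (a - 1)) = mxAt _map a ((b : Int) - 1) := by
  apply List.ext_getElem
  · simp [mxAt_length]
  · intro j hl hr
    rw [List.getElem_set, mxAt_getElem _ _ _ _ hr]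
    by_cases hjb : b = j
    · subst hjb
      rw [if_pos rfl, if_pos ⟨h1, h2⟩, if_pos (by omega)]
    · rw [if_neg hjb, mxAt_getElem _ _ _ _ (by simp only [List.length_set] at hl; exact hl)]
      by_cases hin : 1 ≤ (j : Int) ∧ (j : Int) ≤ ((PySem.List.pyGetD _map 0 []).length : Int) - 2
      · rw [if_pos hin, if_pos hin]
        by_cases hbj : (b : Int) < (j : Int)
        · rw [if_pos hbj, if_pos (by omega)]
        · rw [if_neg hbj, if_neg (by omega)]
      · rw [if_neg hin, if_neg hin]

lemma A_inner (_map : List (List Int)) (a : Nat)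
    (ha1 : 1 ≤ (a : Int)) (ha2 : (a : Int) ≤ (_map.length : Int) - 2) :
    ∀ (n : Nat) (b : Int), b.toNat = n → b ≤ ((PySem.List.pyGetD _map 0 []).length : Int) - 2 →
    (PySem.List.pyRange b 0 (-1)).foldl
      (fun (st : List (List Bool) × List Int) col =>
        (if PySem.List.pyGetD (PySem.List.pyGetD _map (a : Int) []) col 0 ≤ PySem.List.pyGetD st.2 col 0 then
            PySem.List.pySetD st.1 (a : Int) (PySem.List.pySetD (PySem.List.pyGetD st.1 (a : Int) []) col false)
          else st.1,
         if PySem.List.pyGetD (PySem.List.pyGetD _map (a : Int) []) col 0 > PySem.List.pyGetD st.2 col 0 then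
            PySem.List.pySetD st.2 col (PySem.List.pyGetD (PySem.List.pyGetD _map (a : Int) []) col 0)
          else st.2))
      (grid _map (pA (a : Int) b), mxAt _map (a : Int) b)
    = (grid _map (pA (a : Int) 0), mxAt _map (a : Int) 0) := by
  intro n
  induction n with
  | zero =>
    intro b hb0 _
    rw [PySem.List.pyRange_neg_one_eq_nil (by omega)]
    rw [List.foldl_nil]
    have h1 : grid _map (pA (a : Int) b) = grid _map (pA (a : Int) 0) := by
      apply grid_congr
      intro i j _ _
      rcases Nat.eq_zero_or_pos j with hj0 | hj1
      · right; apply tgt_border; subst hj0; right; right; left; exact (by simp : ((0:Nat):Int) < 1)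
      · left; simp only [pA, decide_eq_decide]; omega
    have h2 : mxAt _map (a : Int) b = mxAt _map (a : Int) 0 := by
      apply mxAt_congr
      intro j hj1 hj2
      rw [if_pos (by omega), if_pos (by omega)]
    rw [h1, h2]
  | succ n ih =>
    intro b hb0 hble
    have hb1 : b = ((n + 1 : Nat) : Int) := by omega
    subst hb1
    rw [PySem.List.pyRange_neg_one_cons (by omega)]
    rw [List.foldl_cons]
    have hg : ∀ r c : Int, PySem.List.pyGetD (PySem.List.pyGetD _map r []) c 0 = gEl _map r c :=
      fun _ _ => rfl
    simp only [hg, mxAt_read _map (a : Int) (n + 1) (by omega) hble]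
    by_cases hle : gEl _map (a : Int) ((n + 1 : Nat) : Int) ≤ mA _map ((n + 1 : Nat) : Int) (a : Int)
    · rw [if_pos hle, if_neg (not_lt.mpr hle)]
      rw [PySem.List.pyGetD_natCast, PySem.List.pySetD_natCast, PySem.List.pySetD_natCast]
      rw [grid_set _map (pA (a : Int) ((n + 1 : Nat) : Int)) (pA (a : Int) (((n + 1 : Nat) : Int) - 1)) a (n + 1)
        (by omega) (by omega)
        (by unfold tgt; rw [if_pos ⟨ha1, ha2, by omega, hble, hle⟩])
        (by intro i j _ _
            simp only [pA, ← Bool.decide_and, ← Bool.decide_or, decide_eq_decide]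
            omega)]
      have h2 : mxAt _map (a : Int) ((n + 1 : Nat) : Int) = mxAt _map (a : Int) (((n + 1 : Nat) : Int) - 1) := by
        apply mxAt_congr
        intro j hj1 hj2
        by_cases hjb : ((n + 1 : Nat) : Int) = j
        · subst hjb
          rw [if_neg (lt_irrefl _), if_pos (by omega)]
          rw [mA_step _map _ (a : Int) ha2, if_neg (not_lt.mpr hle)]
        · by_cases hbj : ((n + 1 : Nat) : Int) < j
          · rw [if_pos hbj, if_pos (by omega)]
          · rw [if_neg hbj, if_neg (by omega)]
      rw [h2]
      exact ih _ (by omega) (by omega)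
    · rw [if_neg hle, if_pos (not_le.mp hle)]
      rw [PySem.List.pySetD_natCast]
      have hval : gEl _map (a : Int) ((n + 1 : Nat) : Int) = mA _map ((n + 1 : Nat) : Int) ((a : Int) - 1) := by
        rw [mA_step _map _ (a : Int) ha2, if_pos (not_le.mp hle)]
      rw [hval, mxAt_set _map (a : Int) (n + 1) (by omega) hble]
      have h1 : grid _map (pA (a : Int) ((n + 1 : Nat) : Int)) = grid _map (pA (a : Int) (((n + 1 : Nat) : Int) - 1)) := by
        apply grid_congr
        intro i j _ _
        by_cases hij : i = a ∧ j = n + 1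
        · right
          obtain ⟨rfl, rfl⟩ := hij
          unfold tgt
          rw [if_neg]
          intro hC
          exact hle hC.2.2.2.2
        · left; simp only [pA, decide_eq_decide]; omega
      rw [h1]
      exact ih _ (by omega) (by omega)

lemma A_outer (_map : List (List Int)) :
    ∀ (n : Nat) (a : Int), a.toNat = n → 0 ≤ a → a ≤ (_map.length : Int) - 2 →
    (PySem.List.pyRange a 0 (-1)).foldl
      (fun (st : List (List Bool) × List Int) row =>
        (PySem.List.pyRange (((PySem.List.pyGetD _map 0 []).length : Int) - 2) 0 (-1)).foldl
          (fun (st : List (List Bool) × List Int) col =>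
            (if PySem.List.pyGetD (PySem.List.pyGetD _map row []) col 0 ≤ PySem.List.pyGetD st.2 col 0 then
                PySem.List.pySetD st.1 row (PySem.List.pySetD (PySem.List.pyGetD st.1 row []) col false)
              else st.1,
             if PySem.List.pyGetD (PySem.List.pyGetD _map row []) col 0 > PySem.List.pyGetD st.2 col 0 then
                PySem.List.pySetD st.2 col (PySem.List.pyGetD (PySem.List.pyGetD _map row []) col 0)
              else st.2)) st)
      (grid _map (pA a (((PySem.List.pyGetD _map 0 []).length : Int) - 2)),
       mxAt _map a (((PySem.List.pyGetD _map 0 []).length : Int) - 2))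
    = (grid _map (pA 0 (((PySem.List.pyGetD _map 0 []).length : Int) - 2)),
       mxAt _map 0 (((PySem.List.pyGetD _map 0 []).length : Int) - 2)) := by
  intro n
  induction n with
  | zero =>
    intro a ha0 ha1 _
    have : a = 0 := by omega
    subst this
    rw [PySem.List.pyRange_neg_one_eq_nil le_rfl, List.foldl_nil]
  | succ n ih =>
    intro a ha0 ha1 ha2
    have ha' : a = ((n + 1 : Nat) : Int) := by omega
    subst ha'
    rw [PySem.List.pyRange_neg_one_cons (a := ((n + 1 : Nat) : Int)) (b := 0) (by omega), List.foldl_cons]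
    rw [A_inner _map (n + 1) (by omega) ha2 (((PySem.List.pyGetD _map 0 []).length : Int) - 2).toNat _ rfl le_rfl]
    have h1 : grid _map (pA ((n + 1 : Nat) : Int) 0)
        = grid _map (pA (((n + 1 : Nat) : Int) - 1) (((PySem.List.pyGetD _map 0 []).length : Int) - 2)) := by
      apply grid_congr
      intro i j _ hj
      rcases Nat.eq_zero_or_pos j with hj0 | hj1
      · right; apply tgt_border; subst hj0; right; right; left
        exact (by simp : ((0:Nat):Int) < 1)
      · by_cases hjc : ((PySem.List.pyGetD _map 0 []).length : Int) - 2 < (j : Int)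
        · right; apply tgt_border; right; right; right; exact hjc
        · left; simp only [pA, decide_eq_decide]; omega
    have h2 : mxAt _map ((n + 1 : Nat) : Int) 0
        = mxAt _map (((n + 1 : Nat) : Int) - 1) (((PySem.List.pyGetD _map 0 []).length : Int) - 2) := by
      apply mxAt_congr
      intro j hj1 hj2
      rw [if_pos (by omega), if_neg (by omega)]
    rw [h1, h2]
    exact ih _ (by omega) (by omega) (by omega)

lemma A_eq (_map : List (List Int)) : from_bottom _map = grid _map (fun _ _ => true) := by
  have h0 : from_bottom _map = ((PySem.List.pyRange ((_map.length : Int) - 2) 0 (-1)).foldl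
      (fun (st : List (List Bool) × List Int) row =>
        (PySem.List.pyRange (((PySem.List.pyGetD _map 0 []).length : Int) - 2) 0 (-1)).foldl
          (fun (st : List (List Bool) × List Int) col =>
            (if PySem.List.pyGetD (PySem.List.pyGetD _map row []) col 0 ≤ PySem.List.pyGetD st.2 col 0 then
                PySem.List.pySetD st.1 row (PySem.List.pySetD (PySem.List.pyGetD st.1 row []) col false)
              else st.1,
             if PySem.List.pyGetD (PySem.List.pyGetD _map row []) col 0 > PySem.List.pyGetD st.2 col 0 then
                PySem.List.pySetD st.2 col (PySem.List.pyGetD (PySem.List.pyGetD _map row []) col 0)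
              else st.2)) st)
      (create_vis_map (_map.length : Int) ((PySem.List.pyGetD _map 0 []).length : Int),
       (PySem.List.pyRange 0 ((PySem.List.pyGetD _map 0 []).length : Int)).map
         (fun col => PySem.List.pyGetD (PySem.List.pyGetD _map ((_map.length : Int) - 1) []) col 0))).1 := rfl
  rw [h0]
  have hvis : create_vis_map (_map.length : Int) ((PySem.List.pyGetD _map 0 []).length : Int)
      = grid _map (pA ((_map.length : Int) - 2) (((PySem.List.pyGetD _map 0 []).length : Int) - 2)) := by
    unfold create_vis_map
    rw [PySem.List.foldl_append_singleton_eq_map]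
    rw [List.nil_append, PySem.List.pyRange_zero_natCast, List.map_map]
    unfold grid
    apply List.map_congr_left
    intro i hi
    rw [List.mem_range] at hi
    show PySem.List.pyRepeat [true] ((PySem.List.pyGetD _map 0 []).length : Int) = _
    rw [PySem.List.pyRepeat_singleton, Int.toNat_natCast]
    apply List.ext_getElem
    · simp
    · intro j h1 h2
      rw [List.getElem_replicate]
      simp only [List.getElem_map, List.getElem_range]
      rw [List.length_replicate] at h1
      split
      · next hp =>
        rw [pA, decide_eq_true_eq] at hp
        symm
        apply tgt_border
        rcases hp with hp | hp
        · right; left; omega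
        · right; right; right; omega
      · rfl
  have hmx : (PySem.List.pyRange 0 ((PySem.List.pyGetD _map 0 []).length : Int)).map
         (fun col => PySem.List.pyGetD (PySem.List.pyGetD _map ((_map.length : Int) - 1) []) col 0)
      = mxAt _map ((_map.length : Int) - 2) (((PySem.List.pyGetD _map 0 []).length : Int) - 2) := by
    rw [PySem.List.pyRange_zero_natCast, List.map_map]
    unfold mxAt
    apply List.map_congr_left
    intro j hj
    rw [List.mem_range] at hj
    show PySem.List.pyGetD (PySem.List.pyGetD _map ((_map.length : Int) - 1) []) (j : Int) 0 = _
    split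
    · next hin =>
      rw [if_neg (by omega), mA_nil _map _ _ le_rfl]
      rfl
    · rfl
  rw [hvis, hmx]
  by_cases hr : 2 ≤ _map.length
  · rw [A_outer _map (_map.length - 2) ((_map.length : Int) - 2) (by omega) (by omega) (by omega)]
    apply grid_congr
    intro i j _ _
    rcases Nat.eq_zero_or_pos i with hi0 | hi1
    · right; apply tgt_border; subst hi0; left
      exact (by simp : ((0:Nat):Int) < 1)
    · left
      show pA 0 _ i j = true
      rw [pA, decide_eq_true_eq]
      left; omega
  · rw [PySem.List.pyRange_neg_one_eq_nil (a := (_map.length : Int) - 2) (b := 0) (by omega), List.foldl_nil]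
    apply grid_congr
    intro i j hi _
    right; apply tgt_border; right; left; omega

-- ===== B-side lemmas =====

lemma sel_eq_max (m y : Int) : (if y > m then y else m) = max m y := by
  split
  · next h => rw [max_eq_right (le_of_lt h)]
  · next h => rw [max_eq_left (not_lt.mp h)]

lemma foldl_max_comm (l : List Int) (a b : Int) :
    l.foldl max (max a b) = max a (l.foldl max b) := by
  induction l generalizing b with
  | nil => rfl
  | cons x t ih =>
    simp only [List.foldl_cons]
    rw [max_assoc]
    exact ih (max b x)

-- Python's per-cell max of the column strictly below row r equals A's running maximum mA.
lemma pymax_eq_mA (_map : List (List Int)) (c : Int) :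
    ∀ (n : Nat) (r : Int), (_map.length : Int) - 2 - r = (n : Int) →
    pymax ((PySem.List.pyRange (r + 1) (_map.length : Int)).map
        (fun k => gEl _map k c)) = mA _map c r := by
  intro n
  induction n with
  | zero =>
    intro r hr
    have hr' : r = (_map.length : Int) - 2 := by omega
    subst hr'
    rw [show (_map.length : Int) - 2 + 1 = (_map.length : Int) - 1 by ring]
    rw [PySem.List.pyRange_one_cons (by omega),
        PySem.List.pyRange_one_eq_nil (by omega)]
    rw [mA_nil _map c _ le_rfl]
    rfl
  | succ n ih =>
    intro r hr
    have h1 : r + 1 ≤ (_map.length : Int) - 2 := by omega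
    rw [PySem.List.pyRange_one_cons (by omega)]
    rw [PySem.List.pyRange_one_cons (a := r + 1 + 1) (by omega)]
    simp only [List.map_cons]
    show (List.foldl _ (gEl _map (r + 1) c) (gEl _map (r + 1 + 1) c :: _)) = _
    simp only [sel_eq_max, List.foldl_cons]
    rw [foldl_max_comm]
    have ihr : pymax ((PySem.List.pyRange (r + 1 + 1) (_map.length : Int)).map
        (fun k => gEl _map k c)) = mA _map c (r + 1) := ih (r + 1) (by omega)
    rw [PySem.List.pyRange_one_cons (a := r + 1 + 1) (by omega)] at ihr
    simp only [List.map_cons] at ihr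
    have ihr' : List.foldl max (gEl _map (r + 1 + 1) c)
        ((PySem.List.pyRange (r + 1 + 1 + 1) (_map.length : Int)).map (fun k => gEl _map k c))
        = mA _map c (r + 1) := by
      rw [← ihr]
      show _ = List.foldl _ (gEl _map (r + 1 + 1) c) _
      simp only [sel_eq_max]
    rw [ihr']
    have := mA_step _map c (r + 1) h1
    rw [sel_eq_max] at this
    rw [show r + 1 - 1 = r by ring] at this
    rw [this, max_comm]

lemma B_eq (_map : List (List Int)) : from_bottom_alt _map = grid _map (fun _ _ => true) := by
  have h0 : from_bottom_alt _map = (PySem.List.pyRange 0 (_map.length : Int)).map (fun r =>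
      (PySem.List.pyRange 0 ((PySem.List.pyGetD _map 0 []).length : Int)).map (fun c =>
        !(decide (1 ≤ r ∧ r ≤ (_map.length : Int) - 2) &&
          decide (1 ≤ c ∧ c ≤ ((PySem.List.pyGetD _map 0 []).length : Int) - 2) &&
          decide (gEl _map r c ≤
            pymax ((PySem.List.pyRange (r + 1) (_map.length : Int)).map
              (fun k => gEl _map k c)))))) := rfl
  rw [h0]
  simp only [PySem.List.pyRange_zero_natCast, List.map_map]
  unfold grid
  apply List.map_congr_left
  intro i hi
  rw [List.mem_range] at hi
  simp only [Function.comp_apply, Function.comp_def]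
  apply List.map_congr_left
  intro j hj
  rw [List.mem_range] at hj
  simp only [if_true]
  unfold tgt
  by_cases hri : 1 ≤ (i : Int) ∧ (i : Int) ≤ (_map.length : Int) - 2
  · have hm : pymax ((PySem.List.pyRange ((i : Int) + 1) (_map.length : Int)).map
        (fun k => gEl _map k (j : Int))) = mA _map (j : Int) (i : Int) :=
      pymax_eq_mA _map (j : Int) ((_map.length : Int) - 2 - (i : Int)).toNat (i : Int) (by omega)
    rw [hm]
    by_cases hcj : 1 ≤ (j : Int) ∧ (j : Int) ≤ ((PySem.List.pyGetD _map 0 []).length : Int) - 2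
    · by_cases hle : gEl _map (i : Int) (j : Int) ≤ mA _map (j : Int) (i : Int)
      · rw [if_pos ⟨hri.1, hri.2, hcj.1, hcj.2, hle⟩]
        simp [hri, hcj, hle]
      · rw [if_neg (by rintro ⟨-, -, -, -, hc⟩; exact hle hc)]
        simp [hle]
    · rw [if_neg (by rintro ⟨-, -, hc1, hc2, -⟩; exact hcj ⟨hc1, hc2⟩)]
      simp only [Bool.not_eq_true']
      simp only [Bool.and_eq_false_iff, decide_eq_false_iff_not]
      left; right; exact hcj
  · rw [if_neg (by rintro ⟨hc1, hc2, -⟩; exact hri ⟨hc1, hc2⟩)]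
    simp only [Bool.not_eq_true']
    simp only [Bool.and_eq_false_iff, decide_eq_false_iff_not]
    left; left; exact hri

-- ===== VERDICT (by name: the statement is the Claim_ definition above) =====
theorem from_bottom_spec : Claim_equal_from_bottom := by
  intro _map _ _
  exact (A_eq _map).trans (B_eq _map).symm
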